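-- pv_equiv track=rewrite | github.com/rkimpins/cryptography_challenges | breaking_two_time_pad/breaking_two_time_pad.py | convert_cribbed_to_regex
-- ===== SOURCE A (Python) =====
-- def convert_cribbed_to_regex(string: str) -> list:
--     """Converts a resulting string from cribbing to a format to regex check against dictionary
--
--     The string is divided by spaces. Depending on where each resulting string
--     appears, they may appear at a different point of an english word. For
--     example: "and that is", "and" can be the end of a word, "that" must be an
--     exact match, and "is" could be the beginning of a word". Another example
--     " ant" must be the start of a word, because of the leading space. Using
--     this information, regex symbols are added to reflect the positions it can
--     appear at in a word.
--
--     Parameters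
--     ----------
--     string : str
--         the string to convert to a format appropriate for regex
--
--     Returns
--     -------
--     list
--         list of regex words to check against a dictionary
--     """
--
--     #TODO what happens when we have multiple spaces?
--     # Split into individual words
--     crib_split = string.split(" ")
--
--     # If only 1 word, must be contained within a word
--     if len(crib_split) == 1:
--         crib_split[0] = ".*" + crib_split[0] + ".*"
--     elif len(crib_split) == 2:
--         # Either we have a leading/trailing space, or two words
--         if crib_split[0] == "":
--             crib_split[1] = "^" + crib_split[1] + ".*"
--         elif crib_split[1] == "":
--             crib_split[0] = ".*" + crib_split[0] + "$"
--         else: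
--             crib_split[0] = ".*" + crib_split[0] + "$"
--             crib_split[1] = "^" + crib_split[1] + ".*"
--     elif len(crib_split) >= 3:
--         # Inner words are all exact matches, outer words depend on spaces
--         for index in range(1, len(crib_split)-1):
--             crib_split[index] = "^" + crib_split[index] + "$"
--         if crib_split[0] != "":
--             crib_split[0] = ".*" + crib_split[0] + "$"
--         if crib_split[-1] != "":
--             crib_split[-1] = "^" + crib_split[-1] + ".*"
--     # Remove empty strings
--     crib_split = list(filter(lambda x: x != "", crib_split))
--     return crib_split
-- ===== SOURCE B (Python) =====
-- def convert_cribbed_to_regex(string: str) -> list: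
--     """Global string-rewrite re-implementation: instead of dispatching on token
--     positions, rewrite the whole string at once -- every space becomes the anchor
--     pair "$<NUL>^" and the ends are wrapped in ".*" -- then split on the NUL
--     separator and trim a boundary pattern that came from an empty edge token."""
--     SEP = "\x00"  # never occurs in the printable input
--     pats = (".*" + string.replace(" ", "$" + SEP + "^") + ".*").split(SEP)
--     if len(pats) > 1:
--         if pats[0] == ".*$":
--             pats = pats[1:]
--         if pats[-1] == "^.*":
--             pats = pats[:-1]
--     return pats
-- ===== Notes on version B (the rewrite author's own statement) =====
-- stated objective: alternative
-- what changed: Replaces A's per-token positional dispatch (length cases, index loop, filter) with a single global string rewrite: every space becomes the anchor pair "$\x00^", the ends are wrapped in ".*", the rewritten string is split on the \x00 separator, and a boundary pattern arising from an empty edge token is trimmed off.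
-- intended difference: On the single input " " A returns ["^.*"] because its first-token-empty branch fires first and decorates the equally-empty second token, while B returns [], the intended value: a lone separator carries no crib text, so there is nothing to match. — e.g. on convert_cribbed_to_regex(" "): A returns ["^.*"], B returns []
import Mathlib
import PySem

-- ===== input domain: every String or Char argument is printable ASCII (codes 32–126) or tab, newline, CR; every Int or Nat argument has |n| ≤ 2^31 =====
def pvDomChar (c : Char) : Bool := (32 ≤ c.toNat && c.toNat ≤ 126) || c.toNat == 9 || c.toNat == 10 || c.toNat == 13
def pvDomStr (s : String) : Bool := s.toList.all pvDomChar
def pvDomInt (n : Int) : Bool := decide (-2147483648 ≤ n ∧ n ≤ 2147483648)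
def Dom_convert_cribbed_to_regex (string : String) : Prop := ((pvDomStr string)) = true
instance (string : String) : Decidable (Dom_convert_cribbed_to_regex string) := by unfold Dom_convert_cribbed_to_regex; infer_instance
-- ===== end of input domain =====

-- B replaces A's per-token positional dispatch (length cases, index loop, filter) by one global
-- string rewrite: each space becomes the anchor pair "$\x00^", the ends are wrapped in ".*", the
-- result is split on "\x00" and boundary patterns from empty edge tokens are trimmed (objective:
-- alternative); on the single input " " A returns ["^.*"] by branch-order accident while B
-- returns [] (D_ below).


-- ===== PORT A =====
def convert_cribbed_to_regex (string : String) : List String :=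
  -- crib_split = string.split(" ")  (sep = " " is non-empty, so split? is always some)
  let crib_split := (PySem.Str.split? string " ").getD []
  let crib_split :=
    if crib_split.length = 1 then
      PySem.List.pySetD crib_split 0 (".*" ++ PySem.List.pyGetD crib_split 0 "" ++ ".*")
    else if crib_split.length = 2 then
      if PySem.List.pyGetD crib_split 0 "" = "" then
        PySem.List.pySetD crib_split 1 ("^" ++ PySem.List.pyGetD crib_split 1 "" ++ ".*")
      else if PySem.List.pyGetD crib_split 1 "" = "" then
        PySem.List.pySetD crib_split 0 (".*" ++ PySem.List.pyGetD crib_split 0 "" ++ "$")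
      else
        let cs := PySem.List.pySetD crib_split 0 (".*" ++ PySem.List.pyGetD crib_split 0 "" ++ "$")
        PySem.List.pySetD cs 1 ("^" ++ PySem.List.pyGetD cs 1 "" ++ ".*")
    else if 3 ≤ crib_split.length then
      -- for index in range(1, len(crib_split)-1): crib_split[index] = "^" + crib_split[index] + "$"
      let cs := (PySem.List.pyRange 1 ((crib_split.length : Int) - 1) 1).foldl
        (fun cs idx => PySem.List.pySetD cs idx ("^" ++ PySem.List.pyGetD cs idx "" ++ "$")) crib_split
      let cs := if PySem.List.pyGetD cs 0 "" ≠ "" then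
          PySem.List.pySetD cs 0 (".*" ++ PySem.List.pyGetD cs 0 "" ++ "$") else cs
      if PySem.List.pyGetD cs (-1) "" ≠ "" then
        PySem.List.pySetD cs (-1) ("^" ++ PySem.List.pyGetD cs (-1) "" ++ ".*") else cs
    else crib_split
  crib_split.filter (fun x => x != "")

-- ===== PORT B =====
def convert_cribbed_to_regex_alt (string : String) : List String :=
  -- pats = (".*" + string.replace(" ", "$\x00^") + ".*").split("\x00")
  let pats := (PySem.Str.split?
    (".*" ++ PySem.Str.replace string " " ("$" ++ "\x00" ++ "^") ++ ".*") "\x00").getD []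
  if 1 < pats.length then
    -- pats[0] / pats[-1] never raise: len(pats) > 1, and the first trim leaves ≥ 1 element
    let pats := if PySem.List.pyGetD pats 0 "" = ".*$" then
        PySem.List.slice pats (some 1) none else pats
    if PySem.List.pyGetD pats (-1) "" = "^.*" then
      PySem.List.slice pats none (some (-1)) else pats
  else pats

-- ===== PRECONDITION & SPEC =====
-- On the single input " " A returns ["^.*"] (its first-token-empty branch fires first, so the
-- equally-empty second token is kept and decorated), while B drops both empty boundary tokens and
-- returns [], the intended value: a lone separator carries no crib text, so nothing should match.
def D_convert_cribbed_to_regex (string : String) : Prop := string = " "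
instance (string : String) : Decidable (D_convert_cribbed_to_regex string) := by unfold D_convert_cribbed_to_regex; infer_instance
def Spec_convert_cribbed_to_regex (string : String) (out : List String) : Prop := ¬ D_convert_cribbed_to_regex string → out = convert_cribbed_to_regex_alt string
instance (string : String) (out : List String) : Decidable (Spec_convert_cribbed_to_regex string out) := by unfold Spec_convert_cribbed_to_regex; infer_instance
def pvDiffWitness_convert_cribbed_to_regex : String := " "
def pvDiffWitnessOut_convert_cribbed_to_regex : (List String) × (List String) := (["^.*"], [])

-- ===== CLAIM (what is proved, stated in full; the proofs are below) =====
def Claim_unchanged_convert_cribbed_to_regex : Prop := ∀ (string : String), Dom_convert_cribbed_to_regex string → Spec_convert_cribbed_to_regex string (convert_cribbed_to_regex string)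
def Claim_changed_convert_cribbed_to_regex : Prop := Dom_convert_cribbed_to_regex (pvDiffWitness_convert_cribbed_to_regex) ∧ D_convert_cribbed_to_regex (pvDiffWitness_convert_cribbed_to_regex) ∧ convert_cribbed_to_regex (pvDiffWitness_convert_cribbed_to_regex) = pvDiffWitnessOut_convert_cribbed_to_regex.1 ∧ convert_cribbed_to_regex_alt (pvDiffWitness_convert_cribbed_to_regex) = pvDiffWitnessOut_convert_cribbed_to_regex.2 ∧ pvDiffWitnessOut_convert_cribbed_to_regex.1 ≠ pvDiffWitnessOut_convert_cribbed_to_regex.2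
def Claim_exact_convert_cribbed_to_regex : Prop := ∀ (string : String), Dom_convert_cribbed_to_regex string → D_convert_cribbed_to_regex string → convert_cribbed_to_regex string ≠ convert_cribbed_to_regex_alt string

-- ===== LEMMAS AND PROOFS =====

-- ---------- A-side machinery (reduces port A to a first/middle/last normal form) ----------

-- words[1:-1] on a non-empty list
theorem pv_slice_mid (a : String) (l : List String) :
    PySem.List.slice (a :: l) (some 1) (some (-1)) = l.dropLast := by
  simp [PySem.List.slice, PySem.List.clampIdx, List.dropLast_eq_take]
  rw [if_neg (by omega)]
  omega

theorem pv_pySetD_neg_one (xs : List String) (x v : String) :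
    PySem.List.pySetD (xs ++ [x]) (-1) v = xs ++ [v] := by
  simp [PySem.List.pySetD, PySem.List.pySet?, PySem.List.pyIdx?, List.set_append]

theorem pv_pyGetD_neg_one (xs : List String) (x : String) :
    PySem.List.pyGetD (xs ++ [x]) (-1) "" = x := by
  simp [PySem.List.pyGetD, PySem.List.pyGet?_neg_one_append_singleton]

theorem pv_pyGetD_zero_cons (x : String) (l : List String) :
    PySem.List.pyGetD (x :: l) 0 "" = x := by
  simp [PySem.List.pyGetD, PySem.List.pyGet?_zero_cons]

theorem pv_pySetD_zero_cons (x v : String) (l : List String) :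
    PySem.List.pySetD (x :: l) 0 v = v :: l := by
  simp [PySem.List.pySetD, PySem.List.pySet?, PySem.List.pyIdx?]

theorem pv_pyGetD_neg_one_cons (x : String) (l : List String) (y : String) :
    PySem.List.pyGetD (x :: (l ++ [y])) (-1) "" = y := by
  rw [show x :: (l ++ [y]) = (x :: l) ++ [y] from rfl, pv_pyGetD_neg_one]

theorem pv_pySetD_neg_one_cons (x : String) (l : List String) (y v : String) :
    PySem.List.pySetD (x :: (l ++ [y])) (-1) v = x :: (l ++ [v]) := by
  rw [show x :: (l ++ [y]) = (x :: l) ++ [y] from rfl, pv_pySetD_neg_one]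
  rfl

theorem pv_pyGetD_neg_one_pair (x y : String) :
    PySem.List.pyGetD [x, y] (-1) "" = y := by
  simp [PySem.List.pyGetD, PySem.List.pyGet?_neg_one]

-- the middle loop of A's n ≥ 3 branch maps "^"++·++"$" over the inner tokens
theorem pv_foldl_set_mid :
    ∀ (mid pre : List String) (z : String),
      (PySem.List.pyRange (pre.length : Int) ((pre.length : Int) + mid.length) 1).foldl
        (fun cs idx => PySem.List.pySetD cs idx ("^" ++ PySem.List.pyGetD cs idx "" ++ "$"))
        (pre ++ mid ++ [z])
      = pre ++ mid.map (fun w => "^" ++ w ++ "$") ++ [z] := by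
  intro mid
  induction mid with
  | nil => intro pre z; rw [PySem.List.pyRange_one_eq_nil (by simp)]; simp
  | cons m ms ih =>
    intro pre z
    rw [PySem.List.pyRange_one_cons (by push_cast [List.length_cons]; omega), List.foldl_cons]
    have hget : PySem.List.pyGetD (pre ++ (m :: ms) ++ [z]) (pre.length : Int) "" = m := by
      rw [PySem.List.pyGetD_natCast]
      rw [List.append_assoc]
      simp [List.getD_eq_getElem?_getD]
    have hset : PySem.List.pySetD (pre ++ (m :: ms) ++ [z]) (pre.length : Int)
        ("^" ++ m ++ "$") = (pre ++ ["^" ++ m ++ "$"]) ++ ms ++ [z] := by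
      rw [PySem.List.pySetD_natCast, List.append_assoc, List.set_append]
      simp
    rw [hget, hset]
    have harg : ((pre.length : Int) + 1) = (((pre ++ ["^" ++ m ++ "$"]).length : Int)) := by
      simp
    have harg2 : ((pre.length : Int) + ((m :: ms).length : Int)) =
        ((pre ++ ["^" ++ m ++ "$"]).length : Int) + (ms.length : Int) := by
      simp; omega
    rw [harg, harg2, ih (pre ++ ["^" ++ m ++ "$"]) z]
    simp [List.append_assoc]

-- decorated tokens are never the empty string
theorem pv_ne_empty (p w s : String) (hp : p ≠ "") : (p ++ w ++ s) ≠ "" := by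
  intro h; have := congrArg String.toList h; simp at this; exact hp this.1

theorem pv_bne_hd (w : String) : (("^" ++ w ++ "$") != "") = true := by
  simp only [bne_iff_ne, ne_eq]
  exact pv_ne_empty "^" w "$" (by intro hc; exact absurd (congrArg String.toList hc) (by simp))
theorem pv_bne_hs (w : String) : (("^" ++ w ++ ".*") != "") = true := by
  simp only [bne_iff_ne, ne_eq]
  exact pv_ne_empty "^" w ".*" (by intro hc; exact absurd (congrArg String.toList hc) (by simp))
theorem pv_bne_sd (w : String) : ((".*" ++ w ++ "$") != "") = true := by
  simp only [bne_iff_ne, ne_eq]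
  exact pv_ne_empty ".*" w "$" (by intro hc; exact absurd (congrArg String.toList hc) (by simp))
theorem pv_bne_ss (w : String) : ((".*" ++ w ++ ".*") != "") = true := by
  simp only [bne_iff_ne, ne_eq]
  exact pv_ne_empty ".*" w ".*" (by intro hc; exact absurd (congrArg String.toList hc) (by simp))

theorem pv_filter_map_inner (mid : List String) :
    (mid.map (fun w => "^" ++ w ++ "$")).filter (fun x => x != "") =
      mid.map (fun w => "^" ++ w ++ "$") := by
  apply List.filter_eq_self.mpr
  intro x hx
  obtain ⟨w, _, rfl⟩ := List.mem_map.mp hx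
  exact pv_bne_hd w

-- the n ≥ 3 case of the A-side normal form
theorem pv_big_case (a z : String) (mid : List String) (hmid : mid ≠ []) :
    ((if (a :: (mid ++ [z])).length = 1 then
      PySem.List.pySetD (a :: (mid ++ [z])) 0 (".*" ++ PySem.List.pyGetD (a :: (mid ++ [z])) 0 "" ++ ".*")
    else if (a :: (mid ++ [z])).length = 2 then
      if PySem.List.pyGetD (a :: (mid ++ [z])) 0 "" = "" then
        PySem.List.pySetD (a :: (mid ++ [z])) 1 ("^" ++ PySem.List.pyGetD (a :: (mid ++ [z])) 1 "" ++ ".*")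
      else if PySem.List.pyGetD (a :: (mid ++ [z])) 1 "" = "" then
        PySem.List.pySetD (a :: (mid ++ [z])) 0 (".*" ++ PySem.List.pyGetD (a :: (mid ++ [z])) 0 "" ++ "$")
      else
        let cs := PySem.List.pySetD (a :: (mid ++ [z])) 0 (".*" ++ PySem.List.pyGetD (a :: (mid ++ [z])) 0 "" ++ "$")
        PySem.List.pySetD cs 1 ("^" ++ PySem.List.pyGetD cs 1 "" ++ ".*")
    else if 3 ≤ (a :: (mid ++ [z])).length then
      let cs := (PySem.List.pyRange 1 (((a :: (mid ++ [z])).length : Int) - 1) 1).foldl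
        (fun cs idx => PySem.List.pySetD cs idx ("^" ++ PySem.List.pyGetD cs idx "" ++ "$")) (a :: (mid ++ [z]))
      let cs := if PySem.List.pyGetD cs 0 "" ≠ "" then
          PySem.List.pySetD cs 0 (".*" ++ PySem.List.pyGetD cs 0 "" ++ "$") else cs
      if PySem.List.pyGetD cs (-1) "" ≠ "" then
        PySem.List.pySetD cs (-1) ("^" ++ PySem.List.pyGetD cs (-1) "" ++ ".*") else cs
    else (a :: (mid ++ [z]))).filter (fun x => x != ""))
    =
    (((if PySem.List.pyGetD (a :: (mid ++ [z])) 0 "" = "" then [] else [".*" ++ PySem.List.pyGetD (a :: (mid ++ [z])) 0 "" ++ "$"]) ++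
        (PySem.List.slice (a :: (mid ++ [z])) (some 1) (some (-1))).map (fun w => "^" ++ w ++ "$")) ++
        (if PySem.List.pyGetD (a :: (mid ++ [z])) (-1) "" = "" then [] else ["^" ++ PySem.List.pyGetD (a :: (mid ++ [z])) (-1) "" ++ ".*"])) := by
  have hml : 1 ≤ mid.length := List.length_pos_iff.mpr hmid
  rw [if_neg (by simp), if_neg (by simp; omega), if_pos (by simp; omega)]
  have hb : (((a :: (mid ++ [z])).length : Int) - 1) = 1 + (mid.length : Int) := by
    simp; omega
  have hfold : (PySem.List.pyRange 1 (1 + (mid.length : Int)) 1).foldl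
      (fun cs idx => PySem.List.pySetD cs idx ("^" ++ PySem.List.pyGetD cs idx "" ++ "$"))
      (a :: (mid ++ [z]))
      = a :: (mid.map (fun w => "^" ++ w ++ "$") ++ [z]) := by
    have := pv_foldl_set_mid mid [a] z
    simpa using this
  rw [hb, hfold]
  rw [pv_slice_mid, List.dropLast_concat]
  by_cases ha : a = "" <;> by_cases hz : z = "" <;>
    simp [ha, hz, pv_pyGetD_zero_cons, pv_pySetD_zero_cons, pv_pyGetD_neg_one_cons,
      pv_pySetD_neg_one_cons, List.filter_cons, List.filter_append, pv_filter_map_inner,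
      pv_bne_hd, pv_bne_hs, pv_bne_sd, pv_bne_ss]

-- A's port reduces to the first/middle/last normal form on any split result other than ["", ""]
theorem pv_list_equiv (ws : List String) (h : ws ≠ ["", ""]) :
    ((if ws.length = 1 then
      PySem.List.pySetD ws 0 (".*" ++ PySem.List.pyGetD ws 0 "" ++ ".*")
    else if ws.length = 2 then
      if PySem.List.pyGetD ws 0 "" = "" then
        PySem.List.pySetD ws 1 ("^" ++ PySem.List.pyGetD ws 1 "" ++ ".*")
      else if PySem.List.pyGetD ws 1 "" = "" then
        PySem.List.pySetD ws 0 (".*" ++ PySem.List.pyGetD ws 0 "" ++ "$")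
      else
        let cs := PySem.List.pySetD ws 0 (".*" ++ PySem.List.pyGetD ws 0 "" ++ "$")
        PySem.List.pySetD cs 1 ("^" ++ PySem.List.pyGetD cs 1 "" ++ ".*")
    else if 3 ≤ ws.length then
      let cs := (PySem.List.pyRange 1 ((ws.length : Int) - 1) 1).foldl
        (fun cs idx => PySem.List.pySetD cs idx ("^" ++ PySem.List.pyGetD cs idx "" ++ "$")) ws
      let cs := if PySem.List.pyGetD cs 0 "" ≠ "" then
          PySem.List.pySetD cs 0 (".*" ++ PySem.List.pyGetD cs 0 "" ++ "$") else cs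
      if PySem.List.pyGetD cs (-1) "" ≠ "" then
        PySem.List.pySetD cs (-1) ("^" ++ PySem.List.pyGetD cs (-1) "" ++ ".*") else cs
    else ws).filter (fun x => x != ""))
    =
    (if ws.length = 1 then
      [".*" ++ PySem.List.pyGetD ws 0 "" ++ ".*"]
    else
      ((if PySem.List.pyGetD ws 0 "" = "" then [] else [".*" ++ PySem.List.pyGetD ws 0 "" ++ "$"]) ++
        (PySem.List.slice ws (some 1) (some (-1))).map (fun w => "^" ++ w ++ "$")) ++
        (if PySem.List.pyGetD ws (-1) "" = "" then [] else ["^" ++ PySem.List.pyGetD ws (-1) "" ++ ".*"])) := by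
  cases ws with
  | nil => decide
  | cons a t =>
    cases t with
    | nil =>
      simp [pv_pyGetD_zero_cons, pv_pySetD_zero_cons, List.filter_cons, pv_bne_ss]
    | cons b t2 =>
      cases t2 with
      | nil =>
        -- two tokens; h rules out a = b = ""
        by_cases ha : a = ""
        · have hb : b ≠ "" := by intro hb; exact h (by rw [ha, hb])
          simp [ha, hb, PySem.List.pyGetD, PySem.List.pySetD, PySem.List.pySet?,
            PySem.List.pyIdx?, PySem.List.pyGet?, pv_pyGetD_neg_one_pair, pv_slice_mid,
            List.filter_cons, pv_bne_hs]
        · by_cases hb : b = "" <;>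
            simp [ha, hb, PySem.List.pyGetD, PySem.List.pySetD, PySem.List.pySet?,
              PySem.List.pyIdx?, PySem.List.pyGet?, pv_pyGetD_neg_one_pair, pv_slice_mid,
              List.filter_cons, pv_bne_hs, pv_bne_sd]
      | cons c rest =>
        have hne0 : (b :: c :: rest) ≠ [] := by simp
        obtain ⟨mid, z, hmz, hmidne⟩ :
            ∃ mid z, b :: c :: rest = mid ++ [z] ∧ mid ≠ [] := by
          refine ⟨(b :: c :: rest).dropLast, (b :: c :: rest).getLast hne0,
            (List.dropLast_append_getLast hne0).symm, ?_⟩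
          simp
        rw [show a :: b :: c :: rest = a :: (mid ++ [z]) from by rw [← hmz]]
        conv_rhs => rw [if_neg (by simp : ¬((a :: (mid ++ [z])).length = 1))]
        exact pv_big_case a z mid hmidne

-- ---------- splitOn characterization ----------

theorem pv_go_eq_nil (sep cur : List Char) (acc : List (List Char)) (fuel : Nat) :
    PySem.Chars.splitOn.go sep (fuel+1) [] cur acc = (cur.reverse :: acc).reverse := rfl

theorem pv_go_eq_cons (sep cur : List Char) (acc : List (List Char)) (fuel : Nat) (c : Char) (rest : List Char) :
    PySem.Chars.splitOn.go sep (fuel+1) (c :: rest) cur acc =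
      (if sep.isPrefixOf (c :: rest) then
        PySem.Chars.splitOn.go sep fuel ((c :: rest).drop sep.length) [] (cur.reverse :: acc)
      else PySem.Chars.splitOn.go sep fuel rest (c :: cur) acc) := rfl

-- the accumulator form of splitOn.go, for any sufficient fuel
theorem pv_spl_go (sep : List Char) (hsep : sep ≠ []) :
    ∀ (fuel : Nat) (l cur : List Char) (acc : List (List Char)), l.length < fuel →
      PySem.Chars.splitOn.go sep fuel l cur acc =
        acc.reverse ++ List.modifyHead (cur.reverse ++ ·) (PySem.Chars.splitOn l sep) := by
  have hs1 : 1 ≤ sep.length := List.length_pos_iff.mpr hsep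
  intro fuel
  induction fuel using Nat.strong_induction_on with
  | _ fuel ih =>
    intro l cur acc h
    obtain ⟨f, rfl⟩ : ∃ f, fuel = f + 1 := ⟨fuel - 1, by omega⟩
    cases l with
    | nil =>
      rw [pv_go_eq_nil]
      rw [show PySem.Chars.splitOn ([] : List Char) sep = [[]] from rfl]
      simp
    | cons c rest =>
      rw [pv_go_eq_cons]
      have hlen : (c :: rest).length ≤ f := by simpa using Nat.lt_succ_iff.mp h
      by_cases hpre : sep.isPrefixOf (c :: rest)
      · rw [if_pos hpre]
        have hdrop : ((c :: rest).drop sep.length).length < (c :: rest).length := by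
          simp only [List.length_drop, List.length_cons]; omega
        have hstep : PySem.Chars.splitOn (c :: rest) sep =
            [] :: PySem.Chars.splitOn ((c :: rest).drop sep.length) sep := by
          unfold PySem.Chars.splitOn
          rw [show (c :: rest).length + 1 = rest.length + 1 + 1 from by simp, pv_go_eq_cons,
            if_pos hpre]
          rw [ih (rest.length + 1) (by simp only [List.length_cons] at hlen; omega) _ _ _ (by simp only [List.length_drop, List.length_cons] at hdrop ⊢; omega)]
          rw [show PySem.Chars.splitOn.go sep ((List.drop sep.length (c :: rest)).length + 1)
            (List.drop sep.length (c :: rest)) [] [] =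
            PySem.Chars.splitOn (List.drop sep.length (c :: rest)) sep from rfl]
          cases PySem.Chars.splitOn (List.drop sep.length (c :: rest)) sep <;> simp
        rw [ih f (by omega) _ _ _ (by omega), hstep]
        simp
        cases PySem.Chars.splitOn (List.drop sep.length (c :: rest)) sep <;> simp
      · rw [if_neg hpre]
        have hstep : PySem.Chars.splitOn (c :: rest) sep =
            List.modifyHead (c :: ·) (PySem.Chars.splitOn rest sep) := by
          unfold PySem.Chars.splitOn
          rw [show (c :: rest).length + 1 = rest.length + 1 + 1 from by simp, pv_go_eq_cons,
            if_neg hpre]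
          rw [ih (rest.length + 1) (by simp only [List.length_cons] at hlen; omega) _ _ _ (by omega)]
          rw [show PySem.Chars.splitOn.go sep (rest.length + 1) rest [] [] =
            PySem.Chars.splitOn rest sep from rfl]
          cases PySem.Chars.splitOn rest sep <;> simp
        rw [ih f (by simp only [List.length_cons] at hlen; omega) _ _ _ (by simp only [List.length_cons] at hlen; omega), hstep, List.modifyHead_modifyHead]
        congr 1
        cases PySem.Chars.splitOn rest sep <;> simp

theorem pv_spl_pos (sep : List Char) (hsep : sep ≠ []) (c : Char) (rest : List Char)
    (hpre : sep.isPrefixOf (c :: rest)) :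
    PySem.Chars.splitOn (c :: rest) sep =
      [] :: PySem.Chars.splitOn ((c :: rest).drop sep.length) sep := by
  have hs1 : 1 ≤ sep.length := List.length_pos_iff.mpr hsep
  unfold PySem.Chars.splitOn
  rw [show (c :: rest).length + 1 = rest.length + 1 + 1 from by simp, pv_go_eq_cons, if_pos hpre]
  rw [pv_spl_go sep hsep (rest.length + 1) _ _ _
    (by simp only [List.length_drop, List.length_cons]; omega)]
  rw [show PySem.Chars.splitOn.go sep ((List.drop sep.length (c :: rest)).length + 1)
    (List.drop sep.length (c :: rest)) [] [] =
    PySem.Chars.splitOn (List.drop sep.length (c :: rest)) sep from rfl]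
  cases PySem.Chars.splitOn (List.drop sep.length (c :: rest)) sep <;> simp

theorem pv_spl_neg (sep : List Char) (hsep : sep ≠ []) (c : Char) (rest : List Char)
    (hpre : ¬ sep.isPrefixOf (c :: rest)) :
    PySem.Chars.splitOn (c :: rest) sep =
      List.modifyHead (c :: ·) (PySem.Chars.splitOn rest sep) := by
  unfold PySem.Chars.splitOn
  rw [show (c :: rest).length + 1 = rest.length + 1 + 1 from by simp, pv_go_eq_cons, if_neg hpre]
  rw [pv_spl_go sep hsep (rest.length + 1) _ _ _ (by omega)]
  rw [show PySem.Chars.splitOn.go sep (rest.length + 1) rest [] [] =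
    PySem.Chars.splitOn rest sep from rfl]
  cases PySem.Chars.splitOn rest sep <;> simp

theorem pv_spl_ne_nil_aux (sep : List Char) (hsep : sep ≠ []) :
    ∀ (n : Nat) (l : List Char), l.length ≤ n → PySem.Chars.splitOn l sep ≠ [] := by
  intro n
  induction n with
  | zero =>
    intro l h
    have hl : l = [] := List.length_eq_zero_iff.mp (by omega)
    subst hl
    simp [show PySem.Chars.splitOn ([] : List Char) sep = [[]] from rfl]
  | succ n ih =>
    intro l h
    cases l with
    | nil => simp [show PySem.Chars.splitOn ([] : List Char) sep = [[]] from rfl]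
    | cons c rest =>
      by_cases hpre : sep.isPrefixOf (c :: rest)
      · rw [pv_spl_pos sep hsep c rest hpre]; simp
      · rw [pv_spl_neg sep hsep c rest hpre]
        have := ih rest (by simp only [List.length_cons] at h; omega)
        cases hr : PySem.Chars.splitOn rest sep
        · exact absurd hr this
        · simp

theorem pv_spl_ne_nil (sep : List Char) (hsep : sep ≠ []) (l : List Char) :
    PySem.Chars.splitOn l sep ≠ [] :=
  pv_spl_ne_nil_aux sep hsep l.length l le_rfl

-- splitting a string that contains no separator character
theorem pv_spl_no_sep (d : Char) (u : List Char) (h : d ∉ u) :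
    PySem.Chars.splitOn u [d] = [u] := by
  induction u with
  | nil => rfl
  | cons c t ih =>
    have hcd : ¬ ([d].isPrefixOf (c :: t)) := by
      simp [List.isPrefixOf]
      intro hdc
      exact absurd (hdc ▸ List.mem_cons_self) h
    rw [pv_spl_neg [d] (by simp) c t hcd, ih (fun hm => h (List.mem_cons_of_mem c hm))]
    rfl

-- splitting off the first separator occurrence
theorem pv_spl_sep_append (d : Char) (u v : List Char) (h : d ∉ u) :
    PySem.Chars.splitOn (u ++ d :: v) [d] = u :: PySem.Chars.splitOn v [d] := by
  induction u with
  | nil =>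
    rw [List.nil_append, pv_spl_pos [d] (by simp) d v (by simp [List.isPrefixOf])]
    rfl
  | cons c t ih =>
    have hcd : ¬ ([d].isPrefixOf ((c :: t) ++ d :: v)) := by
      simp [List.isPrefixOf]
      intro hdc
      exact absurd (hdc ▸ List.mem_cons_self) h
    rw [List.cons_append, pv_spl_neg [d] (by simp) c (t ++ d :: v) hcd,
      ih (fun hm => h (List.mem_cons_of_mem c hm))]
    rfl

-- ---------- join / replace ----------

-- joining the pieces of split(" ") with " " gives the string back (used to detect ["",""])
theorem pv_join_append_singleton (sep : List Char) (xs : List (List Char)) (y : List Char) :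
    PySem.Chars.join sep (xs ++ [y]) =
      PySem.Chars.join sep xs ++ (if xs = [] then [] else sep) ++ y := by
  induction xs with
  | nil => simp [PySem.Chars.join_nil, PySem.Chars.join_singleton]
  | cons x rest ih =>
    cases rest with
    | nil => simp [PySem.Chars.join_cons_cons, PySem.Chars.join_singleton]
    | cons r rs =>
      simp only [List.cons_append, PySem.Chars.join_cons_cons]
      rw [← List.cons_append (a := r) (as := rs) (bs := [y]), ih]
      simp [List.append_assoc]

theorem pv_join_go (sep : List Char) (hsep : sep ≠ []) :
    ∀ (fuel : Nat) (l cur : List Char) (acc : List (List Char)), l.length < fuel →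
      PySem.Chars.join sep (PySem.Chars.splitOn.go sep fuel l cur acc) =
        PySem.Chars.join sep acc.reverse ++ (if acc = [] then [] else sep) ++ cur.reverse ++ l := by
  intro fuel
  induction fuel with
  | zero => intro l cur acc h; omega
  | succ fuel ih =>
    intro l cur acc h
    cases l with
    | nil =>
      rw [pv_go_eq_nil, List.reverse_cons, pv_join_append_singleton]
      simp
    | cons c rest =>
      rw [pv_go_eq_cons]
      by_cases hpre : sep.isPrefixOf (c :: rest)
      · rw [if_pos hpre]
        have hlt : ((c :: rest).drop sep.length).length < fuel := by
          have : 0 < sep.length := List.length_pos_iff.mpr hsep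
          simp only [List.length_drop, List.length_cons] at *
          omega
        rw [ih _ _ _ hlt]
        have hl : sep ++ (c :: rest).drop sep.length = c :: rest := by
          exact List.prefix_iff_eq_append.mp (List.isPrefixOf_iff_prefix.mp hpre)
        rw [List.reverse_cons, pv_join_append_singleton]
        simp only [List.reverse_eq_nil_iff, if_neg (by simp : ¬(cur.reverse :: acc = []))]
        rw [← hl]
        by_cases hacc : acc = [] <;> simp [hacc, List.append_assoc]
      · rw [if_neg hpre, ih _ _ _ (by simpa using Nat.lt_of_succ_lt_succ (by simpa using h))]
        simp [List.append_assoc]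

theorem pv_join_splitOn (s : List Char) :
    PySem.Chars.join [' '] (PySem.Chars.splitOn s [' ']) = s := by
  unfold PySem.Chars.splitOn
  rw [pv_join_go [' '] (by simp) (s.length + 1) s [] [] (by omega)]
  simp [PySem.Chars.join_nil]

-- a character of a piece is a character of the joined string
theorem pv_mem_join (sep : List Char) (c : Char) :
    ∀ (ps : List (List Char)) (p : List Char), p ∈ ps → c ∈ p → c ∈ PySem.Chars.join sep ps := by
  intro ps
  induction ps with
  | nil => intro p hp; simp at hp
  | cons q rest ih =>
    intro p hp hc
    cases rest with
    | nil =>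
      rw [PySem.Chars.join_singleton]
      rw [List.mem_singleton.mp hp] at hc
      exact hc
    | cons r rs =>
      rw [PySem.Chars.join_cons_cons]
      rcases List.mem_cons.mp hp with h1 | h2
      · exact List.mem_append_left _ (List.mem_append_left _ (h1 ▸ hc))
      · exact List.mem_append_right _ (ih p h2 hc)

-- replace.go equations
theorem pv_rgo_zero (old new l : List Char) (acc : List Char) :
    PySem.Chars.replace.go old new 0 l acc = acc.reverse ++ l := rfl
theorem pv_rgo_nil (old new : List Char) (acc : List Char) (fuel : Nat) :
    PySem.Chars.replace.go old new (fuel+1) [] acc = acc.reverse := rfl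
theorem pv_rgo_cons (old new : List Char) (acc : List Char) (fuel : Nat) (c : Char) (t : List Char) :
    PySem.Chars.replace.go old new (fuel+1) (c :: t) acc =
      (if old.isPrefixOf (c :: t) then
        PySem.Chars.replace.go old new fuel ((c :: t).drop old.length) (new.reverse ++ acc)
      else PySem.Chars.replace.go old new fuel t (c :: acc)) := rfl

-- str.replace(old, new) = new.join(str.split(old)) for non-empty old
theorem pv_replace_go_join (old new : List Char) (hold : old ≠ []) :
    ∀ (fuel : Nat) (l : List Char) (acc : List Char), l.length ≤ fuel →
      PySem.Chars.replace.go old new fuel l acc =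
        acc.reverse ++ PySem.Chars.join new (PySem.Chars.splitOn l old) := by
  have hs1 : 1 ≤ old.length := List.length_pos_iff.mpr hold
  intro fuel
  induction fuel with
  | zero =>
    intro l acc h
    have hl : l = [] := List.length_eq_zero_iff.mp (by omega)
    subst hl
    rw [pv_rgo_zero]
    simp [show PySem.Chars.splitOn ([] : List Char) old = [[]] from rfl,
      PySem.Chars.join_singleton]
  | succ fuel ih =>
    intro l acc h
    cases l with
    | nil =>
      rw [pv_rgo_nil]
      simp [show PySem.Chars.splitOn ([] : List Char) old = [[]] from rfl,
        PySem.Chars.join_singleton]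
    | cons c t =>
      rw [pv_rgo_cons]
      by_cases hpre : old.isPrefixOf (c :: t)
      · rw [if_pos hpre]
        rw [ih _ _ (by simp only [List.length_drop, List.length_cons] at *; omega)]
        rw [pv_spl_pos old hold c t hpre]
        obtain ⟨q, qs, hq⟩ := List.exists_cons_of_ne_nil
          (pv_spl_ne_nil old hold ((c :: t).drop old.length))
        rw [hq, PySem.Chars.join_cons_cons]
        simp
      · rw [if_neg hpre]
        rw [ih _ _ (by simp only [List.length_cons] at h; omega)]
        rw [pv_spl_neg old hold c t hpre]
        obtain ⟨q, qs, hq⟩ := List.exists_cons_of_ne_nil (pv_spl_ne_nil old hold t)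
        rw [hq]
        cases qs with
        | nil => simp [PySem.Chars.join_singleton]
        | cons r rs => simp [PySem.Chars.join_cons_cons]

theorem pv_replace_join (l old new : List Char) (hold : old ≠ []) :
    PySem.Chars.replace l old new = PySem.Chars.join new (PySem.Chars.splitOn l old) := by
  unfold PySem.Chars.replace
  rw [if_neg (by simp [List.isEmpty_iff, hold])]
  rw [pv_replace_go_join old new hold l.length l [] le_rfl]
  rfl

-- ---------- the decorated split of the marked string ----------

-- the shape produced by splitting the globally rewritten string on the NUL separator
def pvDecorate : List Char → List (List Char) → List (List Char)
  | _, [] => []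
  | x, [p] => [x ++ p ++ ['.', '*']]
  | x, p :: q :: r => (x ++ p ++ ['$']) :: pvDecorate ['^'] (q :: r)

theorem pv_spl_join_decorate :
    ∀ (ps : List (List Char)) (x : List Char), ps ≠ [] → (∀ p ∈ ps, '\x00' ∉ p) → '\x00' ∉ x →
      PySem.Chars.splitOn (x ++ PySem.Chars.join ['$', '\x00', '^'] ps ++ ['.', '*']) ['\x00'] =
        pvDecorate x ps := by
  intro ps
  induction ps with
  | nil => intro x h; exact absurd rfl h
  | cons p rest ih =>
    intro x _ hps hx
    have hp : '\x00' ∉ p := hps p List.mem_cons_self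
    cases rest with
    | nil =>
      rw [PySem.Chars.join_singleton]
      rw [pv_spl_no_sep '\x00' (x ++ p ++ ['.', '*'])
        (by simp [hx, hp])]
      rfl
    | cons q qs =>
      rw [PySem.Chars.join_cons_cons]
      have hrw : x ++ (p ++ ['$', '\x00', '^'] ++ PySem.Chars.join ['$', '\x00', '^'] (q :: qs)) ++ ['.', '*']
          = (x ++ p ++ ['$']) ++ '\x00' :: (['^'] ++ PySem.Chars.join ['$', '\x00', '^'] (q :: qs) ++ ['.', '*']) := by
        simp [List.append_assoc]
      rw [hrw, pv_spl_sep_append '\x00' _ _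
        (by simp [hx, hp])]
      rw [ih ['^'] (by simp) (fun r hr => hps r (List.mem_cons_of_mem p hr)) (by simp)]
      rfl

theorem pv_decorate_snoc (mid : List (List Char)) (z : List Char) :
    pvDecorate ['^'] (mid ++ [z]) =
      mid.map (fun w => ['^'] ++ w ++ ['$']) ++ [['^'] ++ z ++ ['.', '*']] := by
  induction mid with
  | nil => rfl
  | cons m ms ih =>
    cases ms with
    | nil => rfl
    | cons n ns =>
      rw [show ((m :: n :: ns) ++ [z]) = m :: ((n :: ns) ++ [z]) from rfl]
      rw [show (n :: ns) ++ [z] = n :: (ns ++ [z]) from rfl]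
      rw [show pvDecorate ['^'] (m :: n :: (ns ++ [z]))
        = (['^'] ++ m ++ ['$']) :: pvDecorate ['^'] (n :: (ns ++ [z])) from rfl]
      rw [show (n :: (ns ++ [z])) = (n :: ns) ++ [z] from rfl, ih]
      rfl


-- ---------- B-side trim helpers ----------

theorem pv_slice_to_neg_one (xs : List String) :
    PySem.List.slice xs none (some (-1)) = xs.dropLast := by
  simp [PySem.List.slice, PySem.List.clampIdx, List.dropLast_eq_take]
  split_ifs with h
  · simp [h]
  · have : xs.length ≠ 0 := fun h0 => h (List.length_eq_zero_iff.mp h0)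
    omega

theorem pv_trim_first_iff (w : String) : (".*" ++ w ++ "$" = ".*$") ↔ w = "" := by
  constructor
  · intro h
    have h2 := congrArg String.toList h
    simp [String.toList_append] at h2
    exact h2
  · intro h; rw [h]; rfl

theorem pv_trim_last_iff (w : String) : ("^" ++ w ++ ".*" = "^.*") ↔ w = "" := by
  constructor
  · intro h
    have h2 := congrArg String.toList h
    simp [String.toList_append] at h2
    exact h2
  · intro h; rw [h]; rfl

-- the B port evaluated on the decorated pieces of a multi-token split
theorem pv_alt_multi (a z : List Char) (mid : List (List Char)) :
    (let pats := (String.ofList (['.','*'] ++ a ++ ['$'])) ::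
        (mid.map (fun w => String.ofList (['^'] ++ w ++ ['$'])) ++
          [String.ofList (['^'] ++ z ++ ['.','*'])])
     if 1 < pats.length then
       let pats := if PySem.List.pyGetD pats 0 "" = ".*$" then
           PySem.List.slice pats (some 1) none else pats
       if PySem.List.pyGetD pats (-1) "" = "^.*" then
         PySem.List.slice pats none (some (-1)) else pats
     else pats)
    =
    (((if String.ofList a = "" then [] else [".*" ++ String.ofList a ++ "$"]) ++
        (mid.map String.ofList).map (fun w => "^" ++ w ++ "$")) ++
        (if String.ofList z = "" then [] else ["^" ++ String.ofList z ++ ".*"])) := by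
  have hA : String.ofList (['.','*'] ++ a ++ ['$']) = ".*" ++ String.ofList a ++ "$" := by
    rw [String.ofList_append, String.ofList_append]
  have hZ : String.ofList (['^'] ++ z ++ ['.','*']) = "^" ++ String.ofList z ++ ".*" := by
    rw [String.ofList_append, String.ofList_append]
  have hM : mid.map (fun w => String.ofList (['^'] ++ w ++ ['$']))
      = (mid.map String.ofList).map (fun w => "^" ++ w ++ "$") := by
    rw [List.map_map]
    exact List.map_congr_left (fun w _ => by
      rw [Function.comp_apply, String.ofList_append, String.ofList_append])
  simp only [hA, hZ, hM]
  rw [if_pos (show 1 < ((".*" ++ String.ofList a ++ "$") ::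
      ((mid.map String.ofList).map (fun w => "^" ++ w ++ "$") ++
        ["^" ++ String.ofList z ++ ".*"])).length from by simp)]
  rw [pv_pyGetD_zero_cons]
  have hs1 : PySem.List.slice ((".*" ++ String.ofList a ++ "$") ::
      ((mid.map String.ofList).map (fun w => "^" ++ w ++ "$") ++
        ["^" ++ String.ofList z ++ ".*"])) (some 1) none
      = (mid.map String.ofList).map (fun w => "^" ++ w ++ "$") ++
        ["^" ++ String.ofList z ++ ".*"] := by
    rw [PySem.List.slice_from _ (by norm_num)]
    norm_num
  by_cases ha : String.ofList a = ""
  · rw [if_pos ((pv_trim_first_iff _).mpr ha), hs1, pv_pyGetD_neg_one]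
    by_cases hz : String.ofList z = ""
    · rw [if_pos ((pv_trim_last_iff _).mpr hz), pv_slice_to_neg_one, List.dropLast_concat]
      simp [ha, hz]
    · rw [if_neg (fun hc => hz ((pv_trim_last_iff _).mp hc))]
      simp [ha, hz]
  · rw [if_neg (fun hc => ha ((pv_trim_first_iff _).mp hc)), pv_pyGetD_neg_one_cons]
    by_cases hz : String.ofList z = ""
    · rw [if_pos ((pv_trim_last_iff _).mpr hz), pv_slice_to_neg_one,
        show ((".*" ++ String.ofList a ++ "$") ::
          ((mid.map String.ofList).map (fun w => "^" ++ w ++ "$") ++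
            ["^" ++ String.ofList z ++ ".*"]))
          = ((".*" ++ String.ofList a ++ "$") ::
            (mid.map String.ofList).map (fun w => "^" ++ w ++ "$")) ++
            ["^" ++ String.ofList z ++ ".*"] from rfl,
        List.dropLast_concat]
      simp [ha, hz]
    · rw [if_neg (fun hc => hz ((pv_trim_last_iff _).mp hc))]
      simp [ha, hz]

-- ===== VERDICT (by name: the statement is the Claim_ definition above) =====
theorem convert_cribbed_to_regex_spec : Claim_unchanged_convert_cribbed_to_regex := by
  intro s hDom hD
  show convert_cribbed_to_regex s = convert_cribbed_to_regex_alt s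
  -- the split of s on " "
  have hnul : '\x00' ∉ s.toList := by
    intro hm
    have hall := hDom
    unfold Dom_convert_cribbed_to_regex pvDomStr at hall
    have := List.all_eq_true.mp hall _ hm
    simp [pvDomChar] at this
  have hws : PySem.Str.split? s " " =
      some ((PySem.Chars.splitOn s.toList [' ']).map String.ofList) := by
    simp [PySem.Str.split?, PySem.Chars.split?]
  have hwsne : PySem.Chars.splitOn s.toList [' '] ≠ [] := pv_spl_ne_nil [' '] (by simp) _
  have hpieces : ∀ p ∈ PySem.Chars.splitOn s.toList [' '], '\x00' ∉ p := by
    intro p hp hc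
    exact hnul (pv_join_splitOn s.toList ▸ pv_mem_join [' '] '\x00' _ p hp hc)
  -- A's port in first/middle/last normal form
  have hne : (PySem.Chars.splitOn s.toList [' ']).map String.ofList ≠ ["", ""] := by
    intro hcontr
    apply hD
    show s = " "
    have hpieces2 : PySem.Chars.splitOn s.toList [' '] = [[], []] := by
      have := congrArg (List.map String.toList) hcontr
      simpa [Function.comp_def, String.toList_ofList] using this
    have hjoin := pv_join_splitOn s.toList
    rw [hpieces2] at hjoin
    have hchars : s.toList = [' '] := by rw [← hjoin]; rfl
    have := congrArg String.ofList hchars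
    simpa using this
  -- B's port: the marked string and its split
  have hmarked : (".*" ++ PySem.Str.replace s " " ("$" ++ "\x00" ++ "^") ++ ".*").toList
      = ['.','*'] ++ PySem.Chars.join ['$', '\x00', '^'] (PySem.Chars.splitOn s.toList [' ']) ++ ['.','*'] := by
    rw [String.toList_append, String.toList_append, PySem.Str.toList_replace]
    rw [show (" " : String).toList = [' '] from rfl,
      show ("$" ++ "\x00" ++ "^" : String).toList = ['$', '\x00', '^'] from rfl]
    rw [pv_replace_join _ _ _ (by simp)]
    rfl
  have hsplit2 : PySem.Str.split? (".*" ++ PySem.Str.replace s " " ("$" ++ "\x00" ++ "^") ++ ".*") "\x00"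
      = some ((pvDecorate ['.','*'] (PySem.Chars.splitOn s.toList [' '])).map String.ofList) := by
    simp only [PySem.Str.split?, PySem.Chars.split?,
      show ("\x00" : String).toList = ['\x00'] from rfl]
    rw [if_neg (by simp)]
    rw [hmarked, pv_spl_join_decorate _ _ hwsne hpieces (by simp)]
    rfl
  rw [convert_cribbed_to_regex, convert_cribbed_to_regex_alt]
  simp only [hws, hsplit2, Option.getD_some]
  rw [pv_list_equiv _ hne]
  -- case split on the token list
  cases hcase : PySem.Chars.splitOn s.toList [' '] with
  | nil => exact absurd hcase hwsne
  | cons a t =>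
    cases t with
    | nil =>
      -- one token: no trimming on either side
      rw [show pvDecorate ['.','*'] [a] = [['.','*'] ++ a ++ ['.','*']] from rfl]
      rw [if_pos (by simp)]
      rw [if_neg (by simp)]
      simp
      rw [show ('.' :: '*' :: (a ++ ['.', '*'])) = ['.','*'] ++ a ++ ['.','*'] from rfl,
        String.ofList_append, String.ofList_append]
    | cons b t2 =>
      obtain ⟨mid, z, hmz⟩ : ∃ mid z, b :: t2 = mid ++ [z] := by
        refine ⟨(b :: t2).dropLast, (b :: t2).getLast (by simp), ?_⟩
        exact (List.dropLast_append_getLast (by simp)).symm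
      rw [hmz]
      have hdec : pvDecorate ['.','*'] (a :: (mid ++ [z]))
          = (['.','*'] ++ a ++ ['$']) :: pvDecorate ['^'] (mid ++ [z]) := by
        rw [← hmz]
        rfl
      rw [hdec, pv_decorate_snoc]
      rw [if_neg (by simp)]
      -- identify A's normal form pieces
      rw [show ((a :: (mid ++ [z])).map String.ofList)
        = String.ofList a :: ((mid.map String.ofList) ++ [String.ofList z]) from by simp]
      rw [pv_pyGetD_zero_cons, pv_pyGetD_neg_one_cons, pv_slice_mid, List.dropLast_concat]
      -- identify B's pattern list and apply the trim lemma
      have := pv_alt_multi a z mid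
      rw [show List.map String.ofList ((['.','*'] ++ a ++ ['$']) ::
          (mid.map (fun w => ['^'] ++ w ++ ['$']) ++ [['^'] ++ z ++ ['.','*']]))
        = String.ofList (['.','*'] ++ a ++ ['$']) ::
          (mid.map (fun w => String.ofList (['^'] ++ w ++ ['$'])) ++
            [String.ofList (['^'] ++ z ++ ['.','*'])]) from by
          simp [List.map_map, Function.comp_def]]
      exact this.symm

theorem convert_cribbed_to_regex_changed : Claim_changed_convert_cribbed_to_regex := by
  unfold Claim_changed_convert_cribbed_to_regex; decide

theorem convert_cribbed_to_regex_tight : Claim_exact_convert_cribbed_to_regex := by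
  intro s _ hD
  unfold D_convert_cribbed_to_regex at hD
  subst hD
  decide
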